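-- pv_equiv track=rewrite | github.com/hyunsik96/problem-solving | 필수문항/166_팔.py | eight
-- ===== SOURCE A (Python) =====
-- def eight(L, R):
--     ans = 0
--     if len(L) == len(R):
--         for i in range(len(L)):
--             if L[i] != R[i]:
--                 break
--             if L[i] == "8":
--                 ans += 1
--
--     return ans
-- ===== SOURCE B (Python) =====
-- def eight(L, R):
--     if len(L) != len(R):
--         return 0
--     pairs = list(zip(L, R))
--     cut = len(pairs)
--     for i, (a, b) in enumerate(pairs):
--         if a != b:
--             cut = i
--             break
--     return sum(1 for a, _ in pairs[:cut] if a == "8")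
-- ===== Notes on version B (the rewrite author's own statement) =====
-- stated objective: alternative
-- what changed: Instead of A's single index loop that compares and counts in one interleaved pass, B zips the two strings into pairs, finds the index of the first mismatching pair, slices the zipped list to that cut, and counts the pairs whose left component is '8' in a separate pass.
import Mathlib
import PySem

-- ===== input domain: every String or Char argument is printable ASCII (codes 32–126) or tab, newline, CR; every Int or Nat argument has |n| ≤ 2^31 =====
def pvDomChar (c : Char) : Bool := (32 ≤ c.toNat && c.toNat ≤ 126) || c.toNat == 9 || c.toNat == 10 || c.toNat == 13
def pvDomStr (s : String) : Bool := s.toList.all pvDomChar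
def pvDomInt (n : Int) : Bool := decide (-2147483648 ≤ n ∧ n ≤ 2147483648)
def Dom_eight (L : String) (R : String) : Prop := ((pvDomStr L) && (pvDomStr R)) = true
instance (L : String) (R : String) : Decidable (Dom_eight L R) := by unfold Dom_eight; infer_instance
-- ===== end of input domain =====

-- B replaces A's interleaved compare-and-count loop by: zip the strings, find the first
-- mismatching pair's index, slice to that cut, count pairs whose left char is '8'.

-- ===== PORT A =====
-- A's for-loop with break and running counter `ans`, as structural recursion over both char lists.
def eightLoopA : List Char → List Char → Int → Int
  | a :: as, b :: bs, ans =>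
      if a ≠ b then ans
      else eightLoopA as bs (if a = '8' then ans + 1 else ans)
  | _, _, ans => ans

def eight (L : String) (R : String) : Int :=
  if L.toList.length = R.toList.length then eightLoopA L.toList R.toList 0 else 0

-- ===== PORT B =====
-- B's enumerate-with-break loop over the zipped pairs: index of the first mismatch,
-- defaulting to the length of the pair list when no pair mismatches.
def findCutB : List (Char × Char) → Nat
  | [] => 0
  | p :: ps => if p.1 ≠ p.2 then 0 else findCutB ps + 1

-- B: length guard, zip, cut at first mismatch, count '8' left components of the slice.
def eight_alt (L : String) (R : String) : Int :=
  if L.toList.length = R.toList.length then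
    let pairs := L.toList.zip R.toList
    ((pairs.take (findCutB pairs)).countP (fun p => p.1 = '8') : Int)
  else 0

-- ===== PRECONDITION & SPEC =====
def Spec_eight (L : String) (R : String) (out : Int) : Prop := out = eight_alt L R
instance (L : String) (R : String) (out : Int) : Decidable (Spec_eight L R out) := by unfold Spec_eight; infer_instance

-- ===== CLAIM (what is proved, stated in full; the proofs are below) =====
def Claim_equal_eight : Prop := ∀ (L : String) (R : String), Dom_eight L R → Spec_eight L R (eight L R)

-- ===== LEMMAS AND PROOFS =====
theorem eightLoopA_eq_zipCount (l r : List Char) (ans : Int) :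
    eightLoopA l r ans =
      ans + (((l.zip r).take (findCutB (l.zip r))).countP (fun p => p.1 = '8') : Int) := by
  induction l generalizing r ans with
  | nil => cases r <;> simp [eightLoopA, findCutB]
  | cons a as ih =>
    cases r with
    | nil => simp [eightLoopA, findCutB]
    | cons b bs =>
      by_cases h : a = b
      · subst h
        by_cases h8 : a = '8'
        · simp [eightLoopA, findCutB, List.zip_cons_cons, ih, h8]
          ring
        · simp [eightLoopA, findCutB, List.zip_cons_cons, ih, h8]
      · simp [eightLoopA, findCutB, List.zip_cons_cons, h]

-- ===== VERDICT (by name: the statement is the Claim_ definition above) =====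
theorem eight_spec : Claim_equal_eight := by
  intro L R _
  unfold Spec_eight eight eight_alt
  split
  · rw [eightLoopA_eq_zipCount]; ring
  · rfl
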